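-- pv_equiv track=rewrite | github.com/AnkitDash-code/Jett-RAG | RAG-Backend/app/services/llm_client.py | _messages_to_query_context
-- ===== SOURCE A (Python) =====
-- from typing import Optional, AsyncIterator, Dict, Any
--
-- def _messages_to_query_context(
--
--     messages: list[Dict[str, str]],
-- ) -> tuple[str, str]:
--     """
--     Convert chat messages to query/context format for LLM-Backend.
--
--     The LLM-Backend expects:
--     - query: The user's question
--     - context: The RAG context (from system message)
--     """
--     query = ""
--     context = "No context provided."
--
--     for msg in messages:
--         role = msg.get("role", "")
--         content = msg.get("content", "")
--
--         if role == "system":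
--             # System message contains the context
--             context = content
--         elif role == "user":
--             # Last user message is the query
--             query = content
--
--     return query, context
-- ===== SOURCE B (Python) =====
-- def _messages_to_query_context(messages):
--     """Search from the end: first user message seen (from the back) is the
--     query, first system message seen is the context; stop once both found."""
--     query = None
--     context = None
--     for msg in reversed(messages):
--         role = msg.get("role", "")
--         if query is None and role == "user":
--             query = msg.get("content", "")
--         elif context is None and role == "system":
--             context = msg.get("content", "")
--         if query is not None and context is not None:
--             break
--     return (query if query is not None else "",
--             context if context is not None else "No context provided.")
-- ===== Notes on version B (the rewrite author's own statement) =====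
-- stated objective: alternative
-- what changed: B scans the messages in reverse, taking the first user message as the query and the first system message as the context and breaking once both are found, instead of A's forward pass that keeps overwriting both accumulators.
import Mathlib
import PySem

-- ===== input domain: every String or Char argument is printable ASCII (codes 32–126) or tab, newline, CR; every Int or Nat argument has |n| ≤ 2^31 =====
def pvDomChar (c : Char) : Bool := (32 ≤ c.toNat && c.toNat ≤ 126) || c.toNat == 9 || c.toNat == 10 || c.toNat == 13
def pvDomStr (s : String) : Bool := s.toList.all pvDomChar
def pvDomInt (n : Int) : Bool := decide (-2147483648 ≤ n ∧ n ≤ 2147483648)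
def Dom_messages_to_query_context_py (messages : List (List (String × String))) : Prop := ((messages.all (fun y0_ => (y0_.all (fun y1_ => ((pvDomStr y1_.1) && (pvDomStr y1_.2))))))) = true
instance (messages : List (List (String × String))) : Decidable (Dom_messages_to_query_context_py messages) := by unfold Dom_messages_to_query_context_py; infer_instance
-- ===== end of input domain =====

-- B re-decomposes A: instead of a forward pass overwriting query/context, it scans the messages in reverse and keeps the first user/system message it meets, breaking once both are found (objective: alternative).


-- ===== PORT A =====
-- msg.get(k, d) on a dict rendered as an association list: first match, else default (exact)
def pvMsgGet (m : List (String × String)) (k d : String) : String :=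
  match m.find? (fun p => p.1 == k) with
  | some p => p.2
  | none => d

def pvStepA (s : String × String) (msg : List (String × String)) : String × String :=
  let role := pvMsgGet msg "role" ""
  let content := pvMsgGet msg "content" ""
  if role = "system" then (s.1, content)
  else if role = "user" then (content, s.2)
  else s

def messages_to_query_context_py (messages : List (List (String × String))) : String × String :=
  messages.foldl pvStepA ("", "No context provided.")

-- ===== PORT B =====
def pvGoB (oq oc : Option String) : List (List (String × String)) → String × String
  | [] => (oq.getD "", oc.getD "No context provided.")
  | msg :: rest =>
    let role := pvMsgGet msg "role" ""
    let oq' := if oq = none ∧ role = "user" then some (pvMsgGet msg "content" "") else oq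
    let oc' := if ¬ (oq = none ∧ role = "user") ∧ oc = none ∧ role = "system"
               then some (pvMsgGet msg "content" "") else oc
    if oq'.isSome ∧ oc'.isSome then (oq'.getD "", oc'.getD "No context provided.")
    else pvGoB oq' oc' rest

def messages_to_query_context_py_alt (messages : List (List (String × String))) : String × String :=
  pvGoB none none messages.reverse

-- ===== PRECONDITION & SPEC =====
def Spec_messages_to_query_context_py (messages : List (List (String × String))) (out : String × String) : Prop := out = messages_to_query_context_py_alt messages
instance (messages : List (List (String × String))) (out : String × String) : Decidable (Spec_messages_to_query_context_py messages out) := by unfold Spec_messages_to_query_context_py; infer_instance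

-- ===== CLAIM (what is proved, stated in full; the proofs are below) =====
def Claim_equal_messages_to_query_context_py : Prop := ∀ (messages : List (List (String × String))), Dom_messages_to_query_context_py messages → Spec_messages_to_query_context_py messages (messages_to_query_context_py messages)

-- ===== LEMMAS AND PROOFS =====
-- The backward scan with optional accumulators equals A's forward fold, with
-- a set accumulator overriding the fold's corresponding component.
theorem pvGoB_reverse (xs : List (List (String × String))) (oq oc : Option String) :
    pvGoB oq oc xs.reverse =
      (oq.getD (xs.foldl pvStepA ("", "No context provided.")).1,
       oc.getD (xs.foldl pvStepA ("", "No context provided.")).2) := by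
  induction xs using List.reverseRecOn generalizing oq oc with
  | nil =>
      cases oq <;> cases oc <;> simp [pvGoB]
  | append_singleton ys m ih =>
      rw [List.reverse_append, List.reverse_singleton, List.singleton_append,
        List.foldl_append]
      show pvGoB oq oc (m :: ys.reverse) = _
      rw [pvGoB]
      rcases oq with _ | q <;> rcases oc with _ | c <;>
        by_cases hs : pvMsgGet m "role" "" = "system" <;>
        by_cases hu : pvMsgGet m "role" "" = "user" <;>
        simp_all [pvStepA, ih]

-- ===== VERDICT (by name: the statement is the Claim_ definition above) =====
theorem messages_to_query_context_py_spec : Claim_equal_messages_to_query_context_py := by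
  intro messages _
  show messages_to_query_context_py messages = messages_to_query_context_py_alt messages
  rw [messages_to_query_context_py_alt, pvGoB_reverse]
  rfl
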